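-- pv_equiv track=rewrite | github.com/tagore8661/accenture-coding-practice | Problem-11.py | ProductSmallPair
-- ===== SOURCE A (Python) =====
-- def ProductSmallPair(arr,n,sum):
--     if n < 2 :
--         return -1
--     arr_sort = sorted(arr)
--     for i in range(n-1):
--         if arr_sort[i]+arr_sort[i+ 1] <= sum:
--             return arr_sort[i]*arr_sort[i+1]
--         else :
--             return 0
-- ===== SOURCE B (Python) =====
-- def ProductSmallPair(arr, n, sum):
--     if n < 2:
--         return -1
--     if arr[0] <= arr[1]:
--         m1, m2 = arr[0], arr[1]
--     else:
--         m1, m2 = arr[1], arr[0]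
--     for x in arr[2:]:
--         if x < m1:
--             m1, m2 = x, m1
--         elif x < m2:
--             m2 = x
--     if m1 + m2 <= sum:
--         return m1 * m2
--     return 0
-- ===== Notes on version B (the rewrite author's own statement) =====
-- stated objective: faster
-- what changed: Replaces sorting the whole array and reading the first two entries with a single pass that tracks the two smallest elements, then applies the same threshold test.
import Mathlib
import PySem

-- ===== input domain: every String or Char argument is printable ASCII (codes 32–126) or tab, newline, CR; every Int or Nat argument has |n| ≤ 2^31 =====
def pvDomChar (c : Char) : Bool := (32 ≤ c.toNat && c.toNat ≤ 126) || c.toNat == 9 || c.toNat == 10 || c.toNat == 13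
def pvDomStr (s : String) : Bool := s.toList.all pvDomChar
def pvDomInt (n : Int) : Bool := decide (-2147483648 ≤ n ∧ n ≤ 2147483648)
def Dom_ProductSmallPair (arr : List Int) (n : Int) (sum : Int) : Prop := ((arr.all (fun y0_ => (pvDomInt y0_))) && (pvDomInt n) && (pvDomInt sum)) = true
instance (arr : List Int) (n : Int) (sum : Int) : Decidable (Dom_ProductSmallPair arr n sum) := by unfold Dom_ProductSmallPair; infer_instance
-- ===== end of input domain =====

-- B replaces A's full sort with a single pass tracking the two smallest elements (proved to return the same value).


-- ===== PORT A =====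
-- the 'for i in range(n-1)' loop: 'fuel' counts the remaining iterations, i is the loop index;
-- the body returns in BOTH branches, so the recursive call is never reached
def pvLoopA (arr_sort : List Int) (sum : Int) : Nat → Int → Int
  | 0, _ => -1   -- loop exhausted: unreachable for n ≥ 2 (Python would fall through without an int)
  | _fuel + 1, i =>
    match PySem.List.pyGet? arr_sort i, PySem.List.pyGet? arr_sort (i + 1) with
    | some a, some b => if a + b ≤ sum then a * b else 0
    | _, _ => -1   -- IndexError (len(arr) < 2): excluded by Pre_

def ProductSmallPair (arr : List Int) (n : Int) (sum : Int) : Int :=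
  if n < 2 then -1
  else
    let arr_sort := PySem.List.sorted arr (fun x => x) false
    pvLoopA arr_sort sum (n - 1).toNat 0

-- ===== PORT B =====
-- the for-loop of Source B: fold the two-smallest update over the remaining elements
def pvLoopB : List Int → Int → Int → Int × Int
  | [], m1, m2 => (m1, m2)
  | x :: xs, m1, m2 =>
    if x < m1 then pvLoopB xs x m1
    else if x < m2 then pvLoopB xs m1 x
    else pvLoopB xs m1 m2

def ProductSmallPair_alt (arr : List Int) (n : Int) (sum : Int) : Int :=
  if n < 2 then -1
  else
    match PySem.List.pyGet? arr 0 with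
    | none => -1   -- IndexError (arr empty): excluded by Pre_
    | some a0 =>
      match PySem.List.pyGet? arr 1 with
      | none => -1   -- IndexError (len(arr) < 2): excluded by Pre_
      | some a1 =>
        let p := if a0 ≤ a1 then (a0, a1) else (a1, a0)
        let r := pvLoopB (PySem.List.slice arr (some 2) none) p.1 p.2
        if r.1 + r.2 ≤ sum then r.1 * r.2 else 0

-- ===== PRECONDITION & SPEC =====
-- Both programs raise IndexError when n ≥ 2 but len(arr) < 2; exactly those inputs are excluded.
def Pre_ProductSmallPair (arr : List Int) (n : Int) (sum : Int) : Prop := n < 2 ∨ 2 ≤ arr.length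
instance (arr : List Int) (n : Int) (sum : Int) : Decidable (Pre_ProductSmallPair arr n sum) := by unfold Pre_ProductSmallPair; infer_instance
def pvWitness_ProductSmallPair : List Int × Int × Int := ([3, 1, 2], 3, 10)

def Spec_ProductSmallPair (arr : List Int) (n : Int) (sum : Int) (out : Int) : Prop := out = ProductSmallPair_alt arr n sum
instance (arr : List Int) (n : Int) (sum : Int) (out : Int) : Decidable (Spec_ProductSmallPair arr n sum out) := by unfold Spec_ProductSmallPair; infer_instance

-- ===== CLAIM (what is proved, stated in full; the proofs are below) =====
def Claim_equal_ProductSmallPair : Prop := ∀ (arr : List Int) (n : Int) (sum : Int), Dom_ProductSmallPair arr n sum → Pre_ProductSmallPair arr n sum → Spec_ProductSmallPair arr n sum (ProductSmallPair arr n sum)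

-- ===== LEMMAS AND PROOFS =====

-- cycle a three-element prefix: a::b::c ↦ b::c::a
theorem pvPermRotL {α : Type} (a b c : α) (l : List α) :
    (a :: b :: c :: l).Perm (b :: c :: a :: l) :=
  (List.Perm.swap b a (c :: l)).trans (List.Perm.cons b (List.Perm.swap c a l))

-- The single pass returns an ordered pair (p, q) with p ≤ m1, q ≤ m2, and the input
-- is a permutation of p :: q :: t where every element of t is ≥ q.
theorem pvLoopB_spec (xs : List Int) : ∀ m1 m2 : Int, m1 ≤ m2 →
    ∃ p q t, pvLoopB xs m1 m2 = (p, q) ∧ p ≤ q ∧ p ≤ m1 ∧ q ≤ m2 ∧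
      (m1 :: m2 :: xs).Perm (p :: q :: t) ∧ ∀ y ∈ t, q ≤ y := by
  induction xs with
  | nil =>
    intro m1 m2 h
    exact ⟨m1, m2, [], rfl, h, le_refl _, le_refl _, List.Perm.refl _, by simp⟩
  | cons x xs ih =>
    intro m1 m2 h
    by_cases h1 : x < m1
    · obtain ⟨p, q, t, he, hpq, hp, hq, hperm, ht⟩ := ih x m1 (le_of_lt h1)
      refine ⟨p, q, m2 :: t, by simp [pvLoopB, h1, he], hpq,
        le_trans hp (le_of_lt h1), le_trans hq h, ?_, ?_⟩
      · -- m1::m2::x::xs ~ m2::x::m1::xs ~ m2::p::q::t ~ p::q::m2::t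
        exact ((pvPermRotL m1 m2 x xs).trans
          (List.Perm.cons m2 hperm)).trans (pvPermRotL m2 p q t)
      · intro y hy
        rcases List.mem_cons.mp hy with rfl | hy
        · exact le_trans hq h
        · exact ht y hy
    · by_cases h2 : x < m2
      · obtain ⟨p, q, t, he, hpq, hp, hq, hperm, ht⟩ := ih m1 x (by omega)
        refine ⟨p, q, m2 :: t, by simp [pvLoopB, h1, h2, he], hpq, hp, by omega, ?_, ?_⟩
        · -- m1::m2::x::xs ~ m2::m1::x::xs ~ m2::p::q::t ~ p::q::m2::t
          exact ((List.Perm.swap m2 m1 (x :: xs)).trans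
            (List.Perm.cons m2 hperm)).trans (pvPermRotL m2 p q t)
        · intro y hy
          rcases List.mem_cons.mp hy with rfl | hy
          · omega
          · exact ht y hy
      · obtain ⟨p, q, t, he, hpq, hp, hq, hperm, ht⟩ := ih m1 m2 h
        refine ⟨p, q, x :: t, by simp [pvLoopB, h1, h2, he], hpq, hp, hq, ?_, ?_⟩
        · -- m1::m2::x::xs ~ x::m1::m2::xs ~ x::p::q::t ~ p::q::x::t
          have h3 : (m1 :: m2 :: x :: xs).Perm (x :: m1 :: m2 :: xs) :=
            (pvPermRotL m1 m2 x xs).trans (pvPermRotL m2 x m1 xs)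
          exact (h3.trans (List.Perm.cons x hperm)).trans (pvPermRotL x p q t)
        · intro y hy
          rcases List.mem_cons.mp hy with rfl | hy
          · omega
          · exact ht y hy

-- Any ordered pair (p, q) with the remainder bounded below by q names the first two
-- elements of the sorted list.
theorem pvSortedFirstTwo (l : List Int) (p q : Int) (t : List Int)
    (hpq : p ≤ q) (ht : ∀ y ∈ t, q ≤ y) (hperm : l.Perm (p :: q :: t))
    (u v : Int) (t2 : List Int)
    (hs : PySem.List.sorted l (fun x => x) false = u :: v :: t2) :
    u = p ∧ v = q := by
  have hsp : (PySem.List.sorted l (fun x => x) false).Perm l := PySem.List.sorted_perm _ _ _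
  have hperm2 : (u :: v :: t2).Perm (p :: q :: t) := by
    rw [← hs]; exact hsp.trans hperm
  have hpair : (u :: v :: t2).Pairwise (fun a b : Int => a ≤ b) := by
    have := PySem.List.sorted_pairwise (xs := l) (key := fun x : Int => x)
    rwa [hs] at this
  have hule : ∀ y ∈ l, u ≤ y := by
    have := PySem.List.key_head_sorted_le (xs := l) (key := fun x : Int => x) hs
    simpa using this
  have hup : u ≤ p := hule p (hperm.mem_iff.mpr (by simp))
  have hpu : p ≤ u := by
    have hu : u ∈ p :: q :: t := hperm2.mem_iff.mp (by simp)
    rcases List.mem_cons.mp hu with rfl | hu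
    · exact le_refl _
    · rcases List.mem_cons.mp hu with rfl | hu
      · exact hpq
      · exact le_trans hpq (ht u hu)
  have hup' : u = p := le_antisymm hup hpu
  subst hup'
  have hperm3 : (v :: t2).Perm (q :: t) := hperm2.cons_inv
  have hqv : q ≤ v := by
    have hv : v ∈ q :: t := hperm3.mem_iff.mp (by simp)
    rcases List.mem_cons.mp hv with rfl | hv
    · exact le_refl _
    · exact ht v hv
  have hvq : v ≤ q := by
    have hq' : q ∈ v :: t2 := hperm3.mem_iff.mpr (by simp)
    rcases List.mem_cons.mp hq' with rfl | hq'
    · exact le_refl _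
    · exact (List.pairwise_cons.mp (List.pairwise_cons.mp hpair).2).1 q hq'
  exact ⟨rfl, le_antisymm hvq hqv⟩

-- ===== VERDICT (by name: the statement is the Claim_ definition above) =====
theorem ProductSmallPair_spec : Claim_equal_ProductSmallPair := by
  intro arr n sum _hdom hpre
  unfold Spec_ProductSmallPair ProductSmallPair ProductSmallPair_alt
  by_cases hn : n < 2
  · simp [hn]
  · simp only [hn, if_false]
    have hlen : 2 ≤ arr.length := by
      rcases hpre with h | h
      · exact absurd h hn
      · exact h
    obtain ⟨a, b, rest, rfl⟩ : ∃ a b rest, arr = a :: b :: rest := by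
      match arr, hlen with
      | a :: b :: rest, _ => exact ⟨a, b, rest, rfl⟩
    -- the loop has at least one iteration
    obtain ⟨fuel, hfuel⟩ : ∃ fuel, (n - 1).toNat = fuel + 1 :=
      ⟨(n - 1).toNat - 1, by omega⟩
    -- the sorted list has at least two elements
    have hslen : 2 ≤ (PySem.List.sorted (a :: b :: rest) (fun x : Int => x) false).length := by
      rw [PySem.List.length_sorted]; simp
    obtain ⟨u, v, t2, hs⟩ : ∃ u v t2,
        PySem.List.sorted (a :: b :: rest) (fun x : Int => x) false = u :: v :: t2 := by
      match hsort : PySem.List.sorted (a :: b :: rest) (fun x : Int => x) false, hslen with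
      | u :: v :: t2, _ => exact ⟨u, v, t2, by rw [← hsort]⟩
    rw [hs]
    -- B's head reads and slice
    have h0r : (0 : Int) ≤ (rest.length : Int) + 1 := by positivity
    have hget0 : PySem.List.pyGet? (a :: b :: rest) (0 : Int) = some a := by
      simp [PySem.List.pyGet?, PySem.List.pyIdx?, h0r]
    have hslice : PySem.List.slice (a :: b :: rest) (some 2) none = rest := by
      simp [PySem.List.slice]
    -- run B's loop and identify its pair with (u, v)
    by_cases hab : a ≤ b
    · obtain ⟨p, q, t, he, hpq, _, _, hperm, ht⟩ := pvLoopB_spec rest a b hab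
      obtain ⟨hu, hv⟩ := pvSortedFirstTwo (a :: b :: rest) p q t hpq ht hperm u v t2 hs
      have h0t : (0 : Int) ≤ (t2.length : Int) + 1 := by positivity
      simp [hfuel, pvLoopA, h0r, h0t, hslice, hab, he, hu, hv,
        PySem.List.pyGet?, PySem.List.pyIdx?]
    · obtain ⟨p, q, t, he, hpq, _, _, hperm, ht⟩ := pvLoopB_spec rest b a (by omega)
      have hperm' : (a :: b :: rest).Perm (p :: q :: t) :=
        (List.Perm.swap b a rest).trans hperm
      obtain ⟨hu, hv⟩ := pvSortedFirstTwo (a :: b :: rest) p q t hpq ht hperm' u v t2 hs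
      have h0t : (0 : Int) ≤ (t2.length : Int) + 1 := by positivity
      simp [hfuel, pvLoopA, h0r, h0t, hslice, hab, he, hu, hv,
        PySem.List.pyGet?, PySem.List.pyIdx?]
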